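-- pv_equiv track=rewrite | github.com/xiw54/chatbot-play | utils.py | sort_by_len
-- ===== SOURCE A (Python) =====
-- def sort_by_len(questions_int, answers_int, max_line_length=20):
--     sorted_questions = []
--     sorted_answers = []
--
--     for length in range(1, max_line_length + 1):
--         for i in enumerate(questions_int):
--             if len(i[1]) == length:
--                 sorted_questions.append(questions_int[i[0]])
--                 sorted_answers.append(answers_int[i[0]])
--
--     return sorted_questions, sorted_answers
-- ===== SOURCE B (Python) =====
-- def sort_by_len(questions_int, answers_int, max_line_length=20):
--     buckets = {}
--     for q, a in zip(questions_int, answers_int):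
--         n = len(q)
--         if 1 <= n <= max_line_length:
--             buckets.setdefault(n, []).append((q, a))
--
--     sorted_questions = []
--     sorted_answers = []
--     for n in sorted(buckets):
--         for q, a in buckets[n]:
--             sorted_questions.append(q)
--             sorted_answers.append(a)
--
--     return sorted_questions, sorted_answers
-- ===== Notes on version B (the rewrite author's own statement) =====
-- stated objective: faster
-- what changed: A rescans the whole question list once per candidate length 1..max_line_length; B makes one pass over zip(questions,answers) bucketing pairs by length in a dict, then concatenates the buckets in sorted-key order.
import Mathlib
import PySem

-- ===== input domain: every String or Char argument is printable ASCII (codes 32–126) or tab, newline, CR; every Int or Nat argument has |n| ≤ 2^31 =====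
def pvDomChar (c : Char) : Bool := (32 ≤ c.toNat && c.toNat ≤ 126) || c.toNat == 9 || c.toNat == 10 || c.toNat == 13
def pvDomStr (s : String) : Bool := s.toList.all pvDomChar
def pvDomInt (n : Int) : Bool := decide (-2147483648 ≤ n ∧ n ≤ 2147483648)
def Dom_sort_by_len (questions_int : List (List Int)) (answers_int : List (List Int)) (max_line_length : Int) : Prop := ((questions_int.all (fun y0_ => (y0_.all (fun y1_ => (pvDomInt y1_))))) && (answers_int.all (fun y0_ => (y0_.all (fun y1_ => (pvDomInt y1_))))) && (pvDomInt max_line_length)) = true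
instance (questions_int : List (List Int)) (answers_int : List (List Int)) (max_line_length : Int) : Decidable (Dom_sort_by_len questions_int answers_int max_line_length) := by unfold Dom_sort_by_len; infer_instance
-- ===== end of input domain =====

-- B replaces A's rescan-per-length (lengths 1..max_line_length, one full scan each) by one
-- bucketing pass over zip(questions, answers) plus a sort of the distinct lengths: faster.

-- ===== PORT A =====
def sort_by_len (questions_int : List (List Int)) (answers_int : List (List Int)) (max_line_length : Int) : List (List Int) × List (List Int) :=
  (PySem.List.pyRange 1 (max_line_length + 1) 1).foldl
    (fun st length =>
      (PySem.List.enumerate questions_int 0).foldl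
        (fun st i =>
          if ((i.2.length : Int) = length) then
            -- questions_int[i[0]] / answers_int[i[0]]; pyGetD is exact under Pre_ (index in range)
            (st.1 ++ [PySem.List.pyGetD questions_int i.1 []],
             st.2 ++ [PySem.List.pyGetD answers_int i.1 []])
          else st) st)
    ([], [])

-- ===== PORT B =====
-- B's bucket dict: buckets.setdefault(n, []).append((q, a)) == buckets[n] = buckets.get(n, []) + [(q, a)]
-- == Dict.modify n [] (· ++ [(q, a)])
def pvBuckets (questions_int answers_int : List (List Int)) (max_line_length : Int) :
    PySem.Dict Int (List (List Int × List Int)) :=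
  (questions_int.zip answers_int).foldl
    (fun d p =>
      if 1 ≤ (p.1.length : Int) ∧ (p.1.length : Int) ≤ max_line_length then
        d.modify (p.1.length : Int) [] (fun b => b ++ [p])
      else d)
    PySem.Dict.empty

def sort_by_len_alt (questions_int : List (List Int)) (answers_int : List (List Int)) (max_line_length : Int) : List (List Int) × List (List Int) :=
  let buckets := pvBuckets questions_int answers_int max_line_length
  -- for n in sorted(buckets): for q, a in buckets[n]: append  (buckets[n] exact as getD: n is a key)
  (PySem.List.sorted buckets.keys (fun x => x) false).foldl
    (fun st n =>
      (buckets.getD n []).foldl (fun st p => (st.1 ++ [p.1], st.2 ++ [p.2])) st)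
    ([], [])

-- ===== PRECONDITION & SPEC =====
-- Pre_ excludes exactly the inputs where A raises IndexError: a question whose length is in
-- range 1..max_line_length but whose index has no answer (answers_int too short).
def Pre_sort_by_len (questions_int : List (List Int)) (answers_int : List (List Int)) (max_line_length : Int) : Prop :=
  ∀ k : Nat, (h : k < questions_int.length) →
    1 ≤ questions_int[k].length → (questions_int[k].length : Int) ≤ max_line_length →
    k < answers_int.length
instance (questions_int : List (List Int)) (answers_int : List (List Int)) (max_line_length : Int) : Decidable (Pre_sort_by_len questions_int answers_int max_line_length) := by unfold Pre_sort_by_len; infer_instance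

def pvWitness_sort_by_len : List (List Int) × List (List Int) × Int := ([[7], [1, 2]], ([[3], [4]], 2))

def Spec_sort_by_len (questions_int : List (List Int)) (answers_int : List (List Int)) (max_line_length : Int) (out : List (List Int) × List (List Int)) : Prop := out = sort_by_len_alt questions_int answers_int max_line_length
instance (questions_int : List (List Int)) (answers_int : List (List Int)) (max_line_length : Int) (out : List (List Int) × List (List Int)) : Decidable (Spec_sort_by_len questions_int answers_int max_line_length out) := by unfold Spec_sort_by_len; infer_instance

-- ===== CLAIM (what is proved, stated in full; the proofs are below) =====
def Claim_equal_sort_by_len : Prop := ∀ (questions_int : List (List Int)) (answers_int : List (List Int)) (max_line_length : Int), Dom_sort_by_len questions_int answers_int max_line_length → Pre_sort_by_len questions_int answers_int max_line_length → Spec_sort_by_len questions_int answers_int max_line_length (sort_by_len questions_int answers_int max_line_length)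


-- ===== LEMMAS AND PROOFS =====

-- B's bucket for key L: the pairs of the in-range-filtered zip whose question has length L
def pvGat (qs as : List (List Int)) (m L : Int) : List (List Int × List Int) :=
  ((qs.zip as).filter
      (fun p => decide (1 ≤ (p.1.length : Int) ∧ (p.1.length : Int) ≤ m))).filter
    (fun p => (p.1.length : Int) == L)

lemma pv_gat_eq (qs as : List (List Int)) (m L : Int) (h1 : 1 ≤ L) (h2 : L ≤ m) :
    (qs.zip as).filter (fun p => decide ((p.1.length : Int) = L)) = pvGat qs as m L := by
  unfold pvGat
  rw [List.filter_filter]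
  apply List.filter_congr
  intro a _
  by_cases hx : (a.1.length : Int) = L
  · simp [hx]; omega
  · simp [hx]

-- a loop appending two independent accumulators is two appends
lemma pv_foldl_pair_flatMap {α β γ : Type} (l : List α) (f : α → List β) (g : α → List γ)
    (st : List β × List γ) :
    l.foldl (fun st x => (st.1 ++ f x, st.2 ++ g x)) st = (st.1 ++ l.flatMap f, st.2 ++ l.flatMap g) := by
  induction l generalizing st with
  | nil => simp
  | cons x l ih => obtain ⟨a, b⟩ := st; simp [ih, List.append_assoc]

lemma pv_foldl_pair_map {β γ : Type} (l : List (β × γ)) (st : List β × List γ) :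
    l.foldl (fun st p => (st.1 ++ [p.1], st.2 ++ [p.2])) st = (st.1 ++ l.map (·.1), st.2 ++ l.map (·.2)) := by
  induction l generalizing st with
  | nil => simp
  | cons x l ih => obtain ⟨a, b⟩ := st; simp [ih, List.append_assoc]

-- A's inner loop when no remaining question has length L: it is the identity
lemma pv_innerA_nil (L : Int) (base : List (List Int)) (qrem : List (List Int)) (s : Int)
    (acc : List (List Int) × List (List Int))
    (h : ∀ x ∈ qrem, (x.length : Int) ≠ L) :
    (PySem.List.enumerate qrem s).foldl
      (fun st i => if ((i.2.length : Int) = L) then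
          (st.1 ++ [i.2], st.2 ++ [PySem.List.pyGetD base i.1 []]) else st) acc = acc := by
  induction qrem generalizing s acc with
  | nil => simp [PySem.List.enumerate_nil]
  | cons q qrem ih =>
      rw [PySem.List.enumerate_cons, List.foldl_cons]
      rw [if_neg (h q (by simp))]
      exact ih (s + 1) acc (fun x hx => h x (by simp [hx]))

-- A's inner loop over the remaining questions, the answers split as pre ++ rest
lemma pv_innerA (L : Int) (qrem pre rest : List (List Int)) (sq sa : List (List Int))
    (hP : ∀ k : Nat, (h : k < qrem.length) → (qrem[k].length : Int) = L → k < rest.length) :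
    (PySem.List.enumerate qrem (pre.length : Int)).foldl
      (fun st i => if ((i.2.length : Int) = L) then
          (st.1 ++ [i.2], st.2 ++ [PySem.List.pyGetD (pre ++ rest) i.1 []]) else st) (sq, sa)
    = (sq ++ ((qrem.zip rest).filter (fun p => decide ((p.1.length : Int) = L))).map (·.1),
       sa ++ ((qrem.zip rest).filter (fun p => decide ((p.1.length : Int) = L))).map (·.2)) := by
  induction qrem generalizing pre rest sq sa with
  | nil => simp [PySem.List.enumerate_nil]
  | cons q qrem ih =>
      cases rest with
      | nil =>
          have hnone : ∀ x ∈ q :: qrem, (x.length : Int) ≠ L := by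
            intro x hx hxL
            obtain ⟨k, hk, rfl⟩ := List.mem_iff_getElem.mp hx
            exact absurd (hP k hk hxL) (by simp)
          rw [pv_innerA_nil L _ _ _ _ hnone]
          simp
      | cons a rest' =>
          rw [PySem.List.enumerate_cons, List.foldl_cons]
          have ha : PySem.List.pyGetD (pre ++ a :: rest') ((pre.length : Int)) [] = a := by
            simp [PySem.List.pyGetD_natCast, List.getD]
          have hstart : (pre.length : Int) + 1 = ((pre ++ [a]).length : Int) := by simp
          have hbase : pre ++ a :: rest' = (pre ++ [a]) ++ rest' := by simp
          have hP' : ∀ k : Nat, (h : k < qrem.length) → (qrem[k].length : Int) = L → k < rest'.length := by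
            intro k hk hkL
            have h2 := hP (k + 1) (by simpa using Nat.succ_lt_succ hk) (by simpa using hkL)
            simp only [List.length_cons] at h2
            omega
          by_cases hq : (q.length : Int) = L
          · simp only [if_pos hq, ha]
            rw [hstart, hbase, ih (pre ++ [a]) rest' (sq ++ [q]) (sa ++ [a]) hP']
            simp [hq]
          · simp only [if_neg hq]
            rw [hstart, hbase, ih (pre ++ [a]) rest' sq sa hP']
            simp [hq]

-- A's inner loop started at index 0 with the full answers list
lemma pv_innerA0 (L : Int) (qs as sq sa : List (List Int))
    (hP : ∀ k : Nat, (h : k < qs.length) → (qs[k].length : Int) = L → k < as.length) :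
    (PySem.List.enumerate qs 0).foldl
      (fun st i => if ((i.2.length : Int) = L) then
          (st.1 ++ [i.2], st.2 ++ [PySem.List.pyGetD as i.1 []]) else st) (sq, sa)
    = (sq ++ ((qs.zip as).filter (fun p => decide ((p.1.length : Int) = L))).map (·.1),
       sa ++ ((qs.zip as).filter (fun p => decide ((p.1.length : Int) = L))).map (·.2)) := by
  have h := pv_innerA L qs [] as sq sa hP
  simpa using h

-- the bucket dict's lookup is the group for that length
lemma pv_buckets_getD (qs as : List (List Int)) (m L : Int) :
    (pvBuckets qs as m).getD L [] = pvGat qs as m L := by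
  unfold pvBuckets
  have hsel : (qs.zip as).foldl
      (fun d p =>
        if 1 ≤ (p.1.length : Int) ∧ (p.1.length : Int) ≤ m then
          d.modify (p.1.length : Int) [] (fun b => b ++ [p])
        else d)
      PySem.Dict.empty
      = ((qs.zip as).filter
          (fun p => decide (1 ≤ (p.1.length : Int) ∧ (p.1.length : Int) ≤ m))).foldl
          (fun d p => d.modify (p.1.length : Int) [] (fun b => b ++ [p])) PySem.Dict.empty :=
    PySem.List.foldl_ite_eq_foldl_filter
      (p := fun p : List Int × List Int => 1 ≤ (p.1.length : Int) ∧ (p.1.length : Int) ≤ m)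
      (f := fun d p => d.modify (p.1.length : Int) [] (fun b => b ++ [p]))
      (qs.zip as) PySem.Dict.empty
  rw [hsel]
  set zf := (qs.zip as).filter
      (fun p => decide (1 ≤ (p.1.length : Int) ∧ (p.1.length : Int) ≤ m)) with hzf
  have hmap : zf.foldl (fun d p => d.modify (p.1.length : Int) [] (fun b => b ++ [p])) PySem.Dict.empty
      = (zf.map (fun p => ((p.1.length : Int), p))).foldl
          (fun d r => d.modify r.1 [] (fun b => b ++ [r.2])) PySem.Dict.empty := by
    rw [List.foldl_map]
  rw [hmap, PySem.Dict.getD_foldl_modify_append]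
  simp [pvGat, List.filter_map, Function.comp_def]
  rw [hzf, List.filter_filter]
  exact List.filter_congr (by intro a _; simp [Bool.decide_and, Nat.one_le_cast])

-- the bucket dict's keys are the in-range lengths present, in first-occurrence order
lemma pv_buckets_keys (qs as : List (List Int)) (m : Int) :
    (pvBuckets qs as m).keys
    = PySem.Set.ofList
        (((qs.zip as).filter
            (fun p => decide (1 ≤ (p.1.length : Int) ∧ (p.1.length : Int) ≤ m))).map
          (fun p => (p.1.length : Int))) := by
  unfold pvBuckets
  have hsel : (qs.zip as).foldl
      (fun d p =>
        if 1 ≤ (p.1.length : Int) ∧ (p.1.length : Int) ≤ m then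
          d.modify (p.1.length : Int) [] (fun b => b ++ [p])
        else d)
      PySem.Dict.empty
      = ((qs.zip as).filter
          (fun p => decide (1 ≤ (p.1.length : Int) ∧ (p.1.length : Int) ≤ m))).foldl
          (fun d p => d.modify (p.1.length : Int) [] (fun b => b ++ [p])) PySem.Dict.empty :=
    PySem.List.foldl_ite_eq_foldl_filter
      (p := fun p : List Int × List Int => 1 ≤ (p.1.length : Int) ∧ (p.1.length : Int) ≤ m)
      (f := fun d p => d.modify (p.1.length : Int) [] (fun b => b ++ [p]))
      (qs.zip as) PySem.Dict.empty
  rw [hsel, PySem.Dict.keys_foldl_modify_key]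
  simp [PySem.Set.update_nil_left, PySem.Dict.keys_empty]

-- sorting a Nodup list of lengths inside 1..m is filtering the range by membership
lemma pv_sorted_filter (K : List Int) (hnd : K.Nodup) (m : Int)
    (hmem : ∀ L ∈ K, 1 ≤ L ∧ L < m + 1) :
    PySem.List.sorted K (fun x => x) false
      = (PySem.List.pyRange 1 (m + 1) 1).filter (fun L => decide (L ∈ K)) := by
  apply PySem.List.sorted_eq_of_perm_of_pairwise_lt
  · apply (List.perm_ext_iff_of_nodup
      (List.Nodup.filter _ (PySem.List.nodup_pyRange_one 1 (m + 1))) hnd).mpr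
    intro L
    simp only [List.mem_filter, PySem.List.mem_pyRange_one, decide_eq_true_eq]
    constructor
    · rintro ⟨_, h⟩; exact h
    · intro h; exact ⟨hmem L h, h⟩
  · exact List.Pairwise.filter _ (PySem.List.pairwise_lt_pyRange_one 1 (m + 1))

-- generic: dropping list elements whose image under g is empty
lemma pv_flatMap_filter {α β : Type} (l : List α) (p : α → Bool) (g : α → List β)
    (h : ∀ x ∈ l, p x = false → g x = []) :
    l.flatMap g = (l.filter p).flatMap g := by
  induction l with
  | nil => simp
  | cons x l ih =>
      by_cases hx : p x = true
      · simp [hx, ih (fun y hy => h y (by simp [hy]))]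
      · simp only [Bool.not_eq_true] at hx
        simp [hx, h x (by simp) hx, ih (fun y hy => h y (by simp [hy]))]

theorem pv_main (qs as : List (List Int)) (m : Int) (hpre : Pre_sort_by_len qs as m) :
    sort_by_len qs as m = sort_by_len_alt qs as m := by
  have hA : sort_by_len qs as m
      = ((PySem.List.pyRange 1 (m + 1) 1).flatMap (fun L => (pvGat qs as m L).map (·.1)),
         (PySem.List.pyRange 1 (m + 1) 1).flatMap (fun L => (pvGat qs as m L).map (·.2))) := by
    unfold sort_by_len
    have hcong : ∀ L ∈ PySem.List.pyRange 1 (m + 1) 1, ∀ st : List (List Int) × List (List Int),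
        (PySem.List.enumerate qs 0).foldl
          (fun st i =>
            if ((i.2.length : Int) = L) then
              (st.1 ++ [PySem.List.pyGetD qs i.1 []], st.2 ++ [PySem.List.pyGetD as i.1 []])
            else st) st
        = (st.1 ++ (pvGat qs as m L).map (·.1), st.2 ++ (pvGat qs as m L).map (·.2)) := by
      intro L hL st
      obtain ⟨h1, h2⟩ := (PySem.List.mem_pyRange_one).mp hL
      obtain ⟨sq, sa⟩ := st
      have hfix : ∀ i ∈ PySem.List.enumerate qs 0,
          ∀ st' : List (List Int) × List (List Int),
          (if ((i.2.length : Int) = L) then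
              (st'.1 ++ [PySem.List.pyGetD qs i.1 []], st'.2 ++ [PySem.List.pyGetD as i.1 []])
            else st')
          = (if ((i.2.length : Int) = L) then
              (st'.1 ++ [i.2], st'.2 ++ [PySem.List.pyGetD as i.1 []])
            else st') := by
        intro i hi st'
        obtain ⟨k, hk, rfl⟩ := (PySem.List.mem_enumerate_iff _ _ _).mp hi
        have hget : PySem.List.pyGetD qs ((0 : Int) + (k : Int)) [] = qs[k] := by
          simp [PySem.List.pyGetD_natCast, List.getD, hk]
        simp only [hget]
      rw [PySem.List.foldl_congr_mem' _ _ _ _ hfix]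
      have hP : ∀ k : Nat, (h : k < qs.length) → (qs[k].length : Int) = L → k < as.length := by
        intro k hk hkL
        exact hpre k hk (by omega) (by omega)
      rw [pv_innerA0 L qs as sq sa hP, pv_gat_eq qs as m L h1 (by omega)]
    rw [PySem.List.foldl_congr_mem' _ _ _ _ hcong]
    exact pv_foldl_pair_flatMap _ _ _ ([], [])
  have hB : sort_by_len_alt qs as m
      = (((PySem.List.pyRange 1 (m + 1) 1).filter
            (fun L => decide (L ∈ (pvBuckets qs as m).keys))).flatMap
            (fun L => (pvGat qs as m L).map (·.1)),
         ((PySem.List.pyRange 1 (m + 1) 1).filter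
            (fun L => decide (L ∈ (pvBuckets qs as m).keys))).flatMap
            (fun L => (pvGat qs as m L).map (·.2))) := by
    unfold sort_by_len_alt
    have hsorted : PySem.List.sorted (pvBuckets qs as m).keys (fun x => x) false
        = (PySem.List.pyRange 1 (m + 1) 1).filter
            (fun L => decide (L ∈ (pvBuckets qs as m).keys)) := by
      apply pv_sorted_filter
      · rw [pv_buckets_keys]; exact PySem.Set.nodup_ofList _
      · intro L hL
        rw [pv_buckets_keys] at hL
        have hL' := (PySem.Set.mem_ofList _ _).mp hL
        obtain ⟨p, hp, rfl⟩ := List.mem_map.mp hL'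
        have := List.of_mem_filter hp
        simp only [decide_eq_true_eq] at this
        omega
    simp only [hsorted, pv_buckets_getD, pv_foldl_pair_map]
    rw [pv_foldl_pair_flatMap]
    simp
  rw [hA, hB]
  have hnil : ∀ L ∈ PySem.List.pyRange 1 (m + 1) 1,
      decide (L ∈ (pvBuckets qs as m).keys) = false → pvGat qs as m L = [] := by
    intro L _ hfalse
    rw [pv_buckets_keys] at hfalse
    simp only [decide_eq_false_iff_not, PySem.Set.mem_ofList] at hfalse
    unfold pvGat
    rw [List.filter_eq_nil_iff]
    intro p hp hbeq
    exact hfalse (List.mem_map.mpr ⟨p, hp, by simpa using hbeq⟩)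
  simp only [Prod.mk.injEq]
  exact ⟨pv_flatMap_filter _ _ _ (fun L hL h0 => by rw [hnil L hL h0]; simp),
         pv_flatMap_filter _ _ _ (fun L hL h0 => by rw [hnil L hL h0]; simp)⟩

-- ===== VERDICT (by name: the statement is the Claim_ definition above) =====
theorem sort_by_len_spec : Claim_equal_sort_by_len := by
  intro qs as m _ hpre
  unfold Spec_sort_by_len
  exact pv_main qs as m hpre
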